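-- pv_equiv track=rewrite | github.com/Zeydel/Everybody-Codes | The Kingdom of Algorithmia/Quest01/Quest01.py | get_potions_needed_tripe
-- ===== SOURCE A (Python) =====
-- def get_potions_needed(creature):
--     if creature == 'B':
--         return 1
--     elif creature == 'C':
--         return 3
--     elif creature == 'D':
--         return 5
--     else: return 0
--
-- def get_potions_needed_tripe(creatues):
--
--     potions_needed = 0
--
--     empty_slots = sum([1 if c == 'x' else 0 for c in creatues])
--
--     if empty_slots == 0:
--         potions_needed = 6
--     elif empty_slots == 1:
--         potions_needed = 2
--
--     for c in creatues:
--         potions_needed += get_potions_needed(c)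
--
--     return potions_needed
-- ===== SOURCE B (Python) =====
-- def get_potions_needed_tripe(creatues):
--     cnt = {}
--     for c in creatues:
--         cnt[c] = cnt.get(c, 0) + 1
--     x = cnt.get('x', 0)
--     bonus = 6 if x == 0 else 2 if x == 1 else 0
--     return bonus + cnt.get('B', 0) + 3 * cnt.get('C', 0) + 5 * cnt.get('D', 0)
-- ===== Notes on version B (the rewrite author's own statement) =====
-- stated objective: idiomatic
-- what changed: B builds a character frequency table in one pass and computes the result arithmetically from four fixed table lookups, instead of A's two per-character passes (a comprehension-sum for empty slots plus a per-character potion-lookup loop with a chained-if helper call).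
import Mathlib
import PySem

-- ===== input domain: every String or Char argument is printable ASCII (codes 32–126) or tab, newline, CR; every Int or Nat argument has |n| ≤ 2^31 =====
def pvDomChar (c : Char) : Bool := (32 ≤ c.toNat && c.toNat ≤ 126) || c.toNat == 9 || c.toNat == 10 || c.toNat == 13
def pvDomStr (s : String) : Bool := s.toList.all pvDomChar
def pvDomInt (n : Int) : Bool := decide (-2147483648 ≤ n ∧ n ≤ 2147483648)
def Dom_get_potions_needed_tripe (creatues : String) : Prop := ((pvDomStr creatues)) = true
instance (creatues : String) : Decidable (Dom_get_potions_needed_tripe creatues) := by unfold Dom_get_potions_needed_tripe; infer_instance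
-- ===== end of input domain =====

-- B replaces A's two per-character passes with one frequency table built in a single
-- pass and a closed arithmetic expression over the fixed keys 'x','B','C','D' (idiomatic).

-- ===== PORT A =====
def get_potions_needed (creature : Char) : Int :=
  if creature = 'B' then 1
  else if creature = 'C' then 3
  else if creature = 'D' then 5
  else 0

def get_potions_needed_tripe (creatues : String) : Int :=
  let empty_slots : Int :=
    (creatues.toList.map (fun c => if c = 'x' then (1 : Int) else 0)).sum
  let potions_needed : Int :=
    if empty_slots = 0 then 6 else if empty_slots = 1 then 2 else 0
  creatues.toList.foldl (fun acc c => acc + get_potions_needed c) potions_needed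

-- ===== PORT B =====
def get_potions_needed_tripe_alt (creatues : String) : Int :=
  let cnt : PySem.Dict Char Int :=
    creatues.toList.foldl (fun d c => d.modify c 0 (· + 1)) PySem.Dict.empty
  let x := cnt.getD 'x' 0
  let bonus : Int := if x = 0 then 6 else if x = 1 then 2 else 0
  bonus + cnt.getD 'B' 0 + 3 * cnt.getD 'C' 0 + 5 * cnt.getD 'D' 0

-- ===== PRECONDITION & SPEC =====
def Spec_get_potions_needed_tripe (creatues : String) (out : Int) : Prop := out = get_potions_needed_tripe_alt creatues
instance (creatues : String) (out : Int) : Decidable (Spec_get_potions_needed_tripe creatues out) := by unfold Spec_get_potions_needed_tripe; infer_instance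

-- ===== CLAIM (what is proved, stated in full; the proofs are below) =====
def Claim_equal_get_potions_needed_tripe : Prop := ∀ (creatues : String), Dom_get_potions_needed_tripe creatues → Spec_get_potions_needed_tripe creatues (get_potions_needed_tripe creatues)

-- ===== LEMMAS AND PROOFS =====

-- A's comprehension sum for 'x' is the count of 'x'
theorem pv_sum_indicator (l : List Char) :
    (l.map (fun c => if c = 'x' then (1 : Int) else 0)).sum = (l.count 'x' : Int) := by
  induction l with
  | nil => simp
  | cons c l ih =>
    by_cases h : c = 'x' <;> simp [h, ih] <;> ring

-- A's potion loop in terms of counts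
theorem pv_foldl_potions (l : List Char) (acc : Int) :
    l.foldl (fun a c => a + get_potions_needed c) acc
      = acc + (l.count 'B' : Int) + 3 * (l.count 'C' : Int) + 5 * (l.count 'D' : Int) := by
  induction l generalizing acc with
  | nil => simp
  | cons c l ih =>
    simp only [List.foldl_cons, List.count_cons, ih]
    by_cases hB : c = 'B' <;> by_cases hC : c = 'C' <;> by_cases hD : c = 'D' <;>
      simp_all [get_potions_needed] <;> ring

-- ===== VERDICT (by name: the statement is the Claim_ definition above) =====
theorem get_potions_needed_tripe_spec : Claim_equal_get_potions_needed_tripe := by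
  intro s _
  unfold Spec_get_potions_needed_tripe get_potions_needed_tripe get_potions_needed_tripe_alt
  simp only [PySem.Dict.getD_foldl_modify_add_one, PySem.Dict.getD_empty,
    pv_sum_indicator, pv_foldl_potions, zero_add]
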